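-- pv_equiv track=rewrite | github.com/lzy37ld/why_attack | evaluate_for_test_prompter.py | select_max_reward_indexes
-- ===== SOURCE A (Python) =====
-- def select_max_reward_indexes(lst, interval=1):
--     selected_indexes = []
--     for i in range(0, len(lst), interval):
--         # 获取当前组的元素和对应索引
--         group = lst[i:i+interval]
--         group_indexes = list(range(i, min(i+interval, len(lst))))
--
--         # 找到组内最大元素的索引
--         max_value_index = group_indexes[group.index(max(group))]
--
--         selected_indexes.append(max_value_index)
--
--     return selected_indexes
-- ===== SOURCE B (Python) =====
-- def select_max_reward_indexes(lst, interval=1):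
--     n = len(lst)
--     selected_indexes = []
--     for i in range(0, n, interval):
--         end = min(i + interval, n)
--         best = i
--         for j in range(i + 1, end):
--             if lst[j] > lst[best]:
--                 best = j
--         selected_indexes.append(best)
--     return selected_indexes
-- ===== Notes on version B (the rewrite author's own statement) =====
-- stated objective: simpler
-- what changed: Replaces per-group list slicing, index-list building, max() and .index() lookup with a single fused running-argmax scan over the index range of each group (strict > keeps first-occurrence tie-breaking).
import Mathlib
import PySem

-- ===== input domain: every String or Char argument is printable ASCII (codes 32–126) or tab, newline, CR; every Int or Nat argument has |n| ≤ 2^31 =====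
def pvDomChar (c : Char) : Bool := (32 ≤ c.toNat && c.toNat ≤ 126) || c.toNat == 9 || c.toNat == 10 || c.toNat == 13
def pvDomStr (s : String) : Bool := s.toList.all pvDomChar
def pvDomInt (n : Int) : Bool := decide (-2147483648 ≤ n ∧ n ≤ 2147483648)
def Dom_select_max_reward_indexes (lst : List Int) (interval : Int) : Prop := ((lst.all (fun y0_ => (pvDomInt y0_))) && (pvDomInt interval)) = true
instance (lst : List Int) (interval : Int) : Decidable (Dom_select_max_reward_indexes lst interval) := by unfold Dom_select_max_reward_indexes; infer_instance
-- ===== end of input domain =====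

-- B fuses each group's max()+.index() lookups and temporary lists into one running-argmax scan; objective: simpler.


-- ===== PORT A =====
def select_max_reward_indexes (lst : List Int) (interval : Int) : List Int :=
  (PySem.List.pyRange 0 (lst.length : Int) interval).foldl (fun selected_indexes i =>
    let group := PySem.List.slice lst (some i) (some (i + interval))
    let group_indexes := PySem.List.pyRange i (min (i + interval) (lst.length : Int)) 1
    -- max(group) and group.index(...) raise only on an empty group, which never occurs here:
    -- the .getD defaults are never reached for i in the range
    let max_value_index := (PySem.List.pyGet? group_indexes
      ((PySem.List.index? group ((PySem.List.max? group id).getD 0)).getD 0 : Nat)).getD 0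
    selected_indexes ++ [max_value_index]) []

-- ===== PORT B =====
def select_max_reward_indexes_alt (lst : List Int) (interval : Int) : List Int :=
  let n : Int := lst.length
  (PySem.List.pyRange 0 n interval).foldl (fun selected_indexes i =>
    let e := min (i + interval) n
    let best := (PySem.List.pyRange (i + 1) e 1).foldl
      (fun best j => if PySem.List.pyGetD lst best 0 < PySem.List.pyGetD lst j 0 then j else best) i
    selected_indexes ++ [best]) []

-- ===== PRECONDITION & SPEC =====
-- Python's range(0, len(lst), interval) raises ValueError iff interval == 0; A returns on every other input.
def Pre_select_max_reward_indexes (lst : List Int) (interval : Int) : Prop := interval ≠ 0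
instance (lst : List Int) (interval : Int) : Decidable (Pre_select_max_reward_indexes lst interval) := by unfold Pre_select_max_reward_indexes; infer_instance
def pvWitness_select_max_reward_indexes : List Int × Int := ([3, 7, 7, 2, 5], 2)

def Spec_select_max_reward_indexes (lst : List Int) (interval : Int) (out : List Int) : Prop := out = select_max_reward_indexes_alt lst interval
instance (lst : List Int) (interval : Int) (out : List Int) : Decidable (Spec_select_max_reward_indexes lst interval out) := by unfold Spec_select_max_reward_indexes; infer_instance

-- ===== CLAIM (what is proved, stated in full; the proofs are below) =====
def Claim_equal_select_max_reward_indexes : Prop := ∀ (lst : List Int) (interval : Int), Dom_select_max_reward_indexes lst interval → Pre_select_max_reward_indexes lst interval → Spec_select_max_reward_indexes lst interval (select_max_reward_indexes lst interval)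

-- ===== LEMMAS AND PROOFS =====

def pvFirstArg (g : List Int) : Nat :=
  (PySem.List.index? g ((PySem.List.max? g id).getD 0)).getD 0

theorem pvMax?_some (g : List Int) (hg : g ≠ []) : ∃ m, PySem.List.max? g id = some m := by
  unfold PySem.List.max?
  cases g with
  | nil => exact absurd rfl hg
  | cons a t =>
    simp only [List.foldl_cons]
    clear hg
    induction t generalizing a with
    | nil => exact ⟨a, rfl⟩
    | cons x t ih =>
      simp only [List.foldl_cons]
      by_cases h : a < x
      · simpa [h] using ih x
      · simpa [h] using ih a

theorem pvMax?_snoc (g : List Int) (x m : Int) (h : PySem.List.max? g id = some m) :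
    PySem.List.max? (g ++ [x]) id = some (if m < x then x else m) := by
  unfold PySem.List.max? at h ⊢
  rw [List.foldl_append, h]
  simp only [List.foldl]
  split_ifs with h1 <;> simp_all

theorem pvFirstArg_spec (g : List Int) (m : Int) (h : PySem.List.max? g id = some m) :
    PySem.List.index? g m = some (pvFirstArg g) ∧ pvFirstArg g < g.length ∧
      g.getD (pvFirstArg g) 0 = m := by
  have hm : m ∈ g := PySem.List.max?_mem h
  obtain ⟨k, hk⟩ : ∃ k, PySem.List.index? g m = some k := by
    have := List.isSome_idxOf?.2 hm
    simpa [PySem.List.index?, Option.isSome_iff_exists] using this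
  have := (PySem.List.index?_eq_some_iff g m k).1 hk
  obtain ⟨pre, suf, hg, hlen, hnot⟩ := this
  have hfa : pvFirstArg g = k := by
    simp only [pvFirstArg, h, Option.getD_some]
    simpa [PySem.List.index?] using congrArg (Option.getD · 0) hk
  subst hg
  refine ⟨hfa ▸ hk, ?_, ?_⟩ <;> rw [hfa]
  · simp [← hlen]
  · rw [← hlen]
    rw [List.getD_eq_getElem _ _ (by simp)]
    simp

theorem pvFirstArg_snoc (g : List Int) (x : Int) (hg : g ≠ []) :
    pvFirstArg (g ++ [x]) =
      if g.getD (pvFirstArg g) 0 < x then g.length else pvFirstArg g := by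
  obtain ⟨m, hm⟩ := pvMax?_some g hg
  obtain ⟨hidx, hlt, hget⟩ := pvFirstArg_spec g m hm
  have hsnoc := pvMax?_snoc g x m hm
  rw [hget]
  by_cases hc : m < x
  · rw [if_pos hc]
    rw [if_pos hc] at hsnoc
    have hxnot : x ∉ g := fun hx => absurd (PySem.List.max?_isMax hm x hx) (by simp; omega)
    have : PySem.List.index? (g ++ [x]) x = some g.length :=
      (PySem.List.index?_eq_some_iff _ _ _).2 ⟨g, [], rfl, rfl, hxnot⟩
    calc pvFirstArg (g ++ [x]) = (PySem.List.index? (g ++ [x]) x).getD 0 := by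
          simp [pvFirstArg, hsnoc]
      _ = g.length := by rw [this]; rfl
  · rw [if_neg hc]
    rw [if_neg hc] at hsnoc
    obtain ⟨pre, suf, hgeq, hlen, hnot⟩ := (PySem.List.index?_eq_some_iff _ _ _).1 hidx
    have : PySem.List.index? (g ++ [x]) m = some (pvFirstArg g) := by
      refine (PySem.List.index?_eq_some_iff _ _ _).2 ⟨pre, suf ++ [x], ?_, hlen, hnot⟩
      rw [hgeq]; simp
    calc pvFirstArg (g ++ [x]) = (PySem.List.index? (g ++ [x]) m).getD 0 := by
          simp [pvFirstArg, hsnoc]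
      _ = pvFirstArg g := by rw [this]; rfl

theorem pvRange_self (c : Int) : PySem.List.pyRange c c 1 = [] := by
  rw [PySem.List.pyRange_of_pos _ _ one_pos]
  simp

theorem pvRange_get (a b k : Nat) (hk : k < b - a) :
    PySem.List.pyGet? (PySem.List.pyRange (a : Int) (b : Int) 1) (k : Int) = some ((a : Int) + k) := by
  rw [PySem.List.pyGet?_natCast, PySem.List.pyRange_of_pos _ _ one_pos]
  rw [if_pos (by omega : (a : Int) < b)]
  have h1 : (((b : Int) - a + 1 - 1) / 1).toNat = b - a := by omega
  rw [h1]
  rw [List.getElem?_map, List.getElem?_range hk]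
  simp

theorem pvFirstArg_single (y : Int) : pvFirstArg [y] = 0 := by
  simp [pvFirstArg, PySem.List.max?, PySem.List.index?, List.idxOf?]

theorem pvChunkLen (lst : List Int) (a b : Nat) (_hab : a < b) (hb : b ≤ lst.length) :
    ((lst.drop a).take (b - a)).length = b - a := by
  simp; omega

theorem pvChunkGetD (lst : List Int) (a b k : Nat) (hk : k < b - a) (hb : b ≤ lst.length) :
    ((lst.drop a).take (b - a)).getD k 0 = lst.getD (a + k) 0 := by
  rw [List.getD_eq_getElem _ _ (by simp; omega), List.getD_eq_getElem _ _ (by omega)]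
  rw [List.getElem_take, List.getElem_drop]

theorem pvChunkSnoc (lst : List Int) (a b : Nat) (hab : a ≤ b) (hb : b < lst.length) :
    (lst.drop a).take (b + 1 - a) = (lst.drop a).take (b - a) ++ [lst.getD b 0] := by
  have h1 : b + 1 - a = (b - a) + 1 := by omega
  rw [h1, List.take_add_one]
  congr 1
  have h2 : a + (b - a) = b := by omega
  have h3 : (lst.drop a)[b - a]? = some (lst.getD b 0) := by
    rw [List.getElem?_drop, h2, List.getElem?_eq_getElem hb, List.getD_eq_getElem _ _ hb]
  rw [h3]
  rfl

theorem pvChunk (lst : List Int) (a : Nat) (ha : a < lst.length) (b : Nat) (hab : a + 1 ≤ b) :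
    b ≤ lst.length →
    (PySem.List.pyRange ((a : Int) + 1) (b : Int) 1).foldl
      (fun best j => if PySem.List.pyGetD lst best 0 < PySem.List.pyGetD lst j 0 then j else best) (a : Int)
    = (a : Int) + (pvFirstArg ((lst.drop a).take (b - a)) : Int) := by
  induction b, hab using Nat.le_induction with
  | base =>
    intro hb
    have h1 : ((a : Int) + 1) = ((a + 1 : Nat) : Int) := by push_cast; ring
    rw [h1, pvRange_self]
    have h2 : a + 1 - a = 1 := by omega
    have h3 : lst.drop a = lst[a] :: lst.drop (a + 1) := List.drop_eq_getElem_cons ha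
    rw [h2, h3]
    simp only [List.take_succ_cons, List.take_zero, pvFirstArg_single]
    simp
  | succ b hab ih =>
    intro hb1
    have hbl : b ≤ lst.length := by omega
    have hbl' : b < lst.length := by omega
    have h1 : ((b + 1 : Nat) : Int) = (b : Int) + 1 := by push_cast; ring
    rw [h1, PySem.List.pyRange_one_succ_right (by exact_mod_cast Nat.cast_le.2 hab), List.foldl_append,
      ih hbl]
    simp only [List.foldl]
    set g := (lst.drop a).take (b - a) with hg
    have hglen : g.length = b - a := pvChunkLen lst a b (by omega) hbl
    have hgne : g ≠ [] := by
      intro h; rw [h] at hglen; simp at hglen; omega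
    set k := pvFirstArg g with hk
    have hklt : k < b - a := by
      obtain ⟨m, hm⟩ := pvMax?_some g hgne
      have := (pvFirstArg_spec g m hm).2.1
      omega
    have e1 : PySem.List.pyGetD lst ((a : Int) + (k : Int)) 0 = g.getD k 0 := by
      have : (a : Int) + (k : Int) = ((a + k : Nat) : Int) := by push_cast; ring
      rw [this, PySem.List.pyGetD_natCast, hg, pvChunkGetD lst a b k hklt hbl]
    have e2 : PySem.List.pyGetD lst (b : Int) 0 = lst.getD b 0 := by
      rw [PySem.List.pyGetD_natCast]
    have e3 : (lst.drop a).take (b + 1 - a) = g ++ [lst.getD b 0] :=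
      pvChunkSnoc lst a b (by omega) hbl'
    rw [e1, e2, e3, pvFirstArg_snoc g (lst.getD b 0) hgne, ← hk]
    by_cases hc : g.getD k 0 < lst.getD b 0
    · rw [if_pos hc, if_pos hc, hglen]
      omega
    · rw [if_neg hc, if_neg hc]


theorem pvRange_neg (b s : Int) (hs : s < 0) (hb : 0 ≤ b) : PySem.List.pyRange 0 b s = [] := by
  simp [PySem.List.pyRange]
  intro h1
  split_ifs <;> omega

-- ===== VERDICT (by name: the statement is the Claim_ definition above) =====
theorem select_max_reward_indexes_spec : Claim_equal_select_max_reward_indexes := by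
  intro lst interval _ hpre
  unfold Spec_select_max_reward_indexes select_max_reward_indexes select_max_reward_indexes_alt
  dsimp only
  rcases lt_trichotomy interval 0 with hneg | h0 | hpos
  · rw [pvRange_neg _ _ hneg (by positivity)]
    rfl
  · exact absurd h0 hpre
  · refine PySem.List.foldl_congr_mem _ _ _ _ ?_
    intro acc i hi
    obtain ⟨hi0, hilt, -⟩ := (PySem.List.mem_pyRange_iff_of_pos hpos i).1 hi
    obtain ⟨a, rfl⟩ : ∃ a : Nat, i = (a : Int) := ⟨i.toNat, (Int.toNat_of_nonneg hi0).symm⟩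
    obtain ⟨iv, rfl⟩ : ∃ v : Nat, interval = (v : Int) := ⟨interval.toNat, (Int.toNat_of_nonneg hpos.le).symm⟩
    have halt : a < lst.length := by exact_mod_cast hilt
    have hivpos : 1 ≤ iv := by exact_mod_cast hpos
    set b := min (a + iv) lst.length with hbdef
    have hab : a < b := by omega
    have hble : b ≤ lst.length := by omega
    have he : min ((a : Int) + (iv : Int)) ((lst.length : Int)) = (b : Int) := by
      rw [hbdef]; omega
    have hgroup : PySem.List.slice lst (some (a : Int)) (some ((a : Int) + (iv : Int))) =
        (lst.drop a).take (b - a) := by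
      have h1 : (a : Int) + (iv : Int) = ((a + iv : Nat) : Int) := by push_cast; ring
      rw [h1, PySem.List.slice_natCast]
      have h2 : a + iv - a = iv := by omega
      rw [h2, List.take_eq_take_min]
      congr 1
      simp
      omega
    rw [he, hgroup]
    congr 1
    set g := (lst.drop a).take (b - a) with hg
    have hglen : g.length = b - a := pvChunkLen lst a b hab hble
    have hgne : g ≠ [] := by
      intro h; rw [h] at hglen; simp at hglen; omega
    set k := (PySem.List.index? g ((PySem.List.max? g id).getD 0)).getD 0 with hkdef
    have hkfa : k = pvFirstArg g := rfl
    have hklt : k < b - a := by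
      obtain ⟨m, hm⟩ := pvMax?_some g hgne
      have := (pvFirstArg_spec g m hm).2.1
      omega
    rw [pvChunk lst a halt b (by omega) hble, ← hg, ← hkfa]
    rw [pvRange_get a b k hklt]
    rfl
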